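-- pv_equiv track=rewrite | github.com/BquantFinance/licitaciones-espana | scripts/ccaa_cataluna_contratosmenores.py | build_branch_key
-- ===== SOURCE A (Python) =====
-- def build_branch_key(params: dict) -> str:
--     preferred_order = ["faseVigent", "ambit", "tipusContracte", "procedimentAdjudicacio", "organ"]
--     ordered_keys = [key for key in preferred_order if key in params]
--     ordered_keys.extend(sorted(key for key in params if key not in preferred_order))
--     parts = []
--     for key in ordered_keys:
--         value = params[key]
--         normalized_key = str(key).replace("_", "-")
--         normalized_value = str(value).replace("/", "-").replace(" ", "_").replace(";", "")
--         parts.append(f"{normalized_key}-{normalized_value}")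
--     return "__".join(parts)
-- ===== SOURCE B (Python) =====
-- def build_branch_key(params: dict) -> str:
--     preferred_order = ["faseVigent", "ambit", "tipusContracte", "procedimentAdjudicacio", "organ"]
--
--     def norm_key(key):
--         return "".join("-" if c == "_" else c for c in str(key))
--
--     def norm_value(value):
--         return "".join(
--             "-" if c == "/" else "_" if c == " " else c
--             for c in str(value)
--             if c != ";"
--         )
--
--     def sort_key(item):
--         key = item[0]
--         rank = preferred_order.index(key) if key in preferred_order else len(preferred_order)
--         return (rank, key)
--
--     return "__".join(
--         norm_key(key) + "-" + norm_value(value)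
--         for key, value in sorted(params.items(), key=sort_key)
--     )
-- ===== Notes on version B (the rewrite author's own statement) =====
-- stated objective: alternative
-- what changed: Replaces A's two-phase key ordering (filter over preferred_order, then a separate sorted() over the remaining keys) by one sort of the items with a composite (rank, key) sort key, and replaces the chained str.replace normalization by a single per-character translation pass.
import Mathlib
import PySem

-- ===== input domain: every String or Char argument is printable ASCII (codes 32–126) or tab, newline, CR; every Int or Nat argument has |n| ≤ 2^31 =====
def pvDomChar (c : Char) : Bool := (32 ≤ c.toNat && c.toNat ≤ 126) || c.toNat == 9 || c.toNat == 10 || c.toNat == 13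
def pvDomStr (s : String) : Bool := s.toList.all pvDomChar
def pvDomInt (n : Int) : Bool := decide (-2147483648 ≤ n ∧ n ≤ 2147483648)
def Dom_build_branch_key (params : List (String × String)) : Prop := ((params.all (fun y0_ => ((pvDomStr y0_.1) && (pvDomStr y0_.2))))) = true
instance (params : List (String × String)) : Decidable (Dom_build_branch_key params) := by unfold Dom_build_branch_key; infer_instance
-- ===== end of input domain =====

-- B replaces A's two-phase key ordering (preferred filter + separate sort of the rest) by one
-- composite-(rank, key) sort of the items, and A's chained str.replace normalization by a single
-- per-character translation pass. Alternative decomposition, same cost.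

-- ===== PORT A =====
def build_branch_key (params : List (String × String)) : String :=
  let preferred_order : List String :=
    ["faseVigent", "ambit", "tipusContracte", "procedimentAdjudicacio", "organ"]
  let d : PySem.Dict String String := PySem.Dict.ofList params
  let ordered_keys : List String :=
    (preferred_order.filter (fun key => d.contains key)) ++
      PySem.List.sorted (d.keys.filter (fun key => !preferred_order.contains key)) (fun x => x)
  let parts : List String := ordered_keys.foldl
    (fun acc key =>
      -- params[key]: key is always a key of d here, so getD is exact (never the default)
      acc ++ [PySem.Str.replace key "_" "-" ++ "-" ++
        PySem.Str.replace (PySem.Str.replace (PySem.Str.replace (d.getD key "") "/" "-") " " "_") ";" ""])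
    []
  PySem.Str.join "__" parts

-- ===== PORT B =====
-- B's helpers (from Source B): the per-character normalizers and the composite sort key
def pvPrefB : List String :=
  ["faseVigent", "ambit", "tipusContracte", "procedimentAdjudicacio", "organ"]

-- "".join("-" if c == "_" else c for c in str(key))
def pvNormKeyB (cs : List Char) : List Char :=
  cs.map (fun c => if c = '_' then '-' else c)

-- "".join("-" if c == "/" else "_" if c == " " else c for c in str(value) if c != ";")
def pvNormValB (cs : List Char) : List Char :=
  (cs.filter (fun c => c ≠ ';')).map (fun c => if c = '/' then '-' else if c = ' ' then '_' else c)

-- rank = preferred_order.index(key) if key in preferred_order else len(preferred_order)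
def pvRankB (key : String) : Int :=
  if pvPrefB.contains key then (((PySem.List.index? pvPrefB key).getD 0 : Nat) : Int)
  else (pvPrefB.length : Int)

def build_branch_key_alt (params : List (String × String)) : String :=
  let d : PySem.Dict String String := PySem.Dict.ofList params
  -- sorted(params.items(), key=sort_key) with sort_key item = (rank of item[0], item[0])
  let its : List (String × String) := PySem.List.sorted2 d.items (fun p => pvRankB p.1) (fun p => p.1)
  PySem.Str.join "__"
    (its.map (fun p => String.ofList (pvNormKeyB p.1.toList ++ '-' :: pvNormValB p.2.toList)))

-- ===== PRECONDITION & SPEC =====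
def Spec_build_branch_key (params : List (String × String)) (out : String) : Prop := out = build_branch_key_alt params
instance (params : List (String × String)) (out : String) : Decidable (Spec_build_branch_key params out) := by unfold Spec_build_branch_key; infer_instance

-- ===== CLAIM (what is proved, stated in full; the proofs are below) =====
def Claim_equal_build_branch_key : Prop := ∀ (params : List (String × String)), Dom_build_branch_key params → Spec_build_branch_key params (build_branch_key params)

-- ===== LEMMAS AND PROOFS =====

-- chained single-character str.replace, characterized: replace.go on a one-char pattern
theorem pv_go_single (a : Char) (new : List Char) :
    ∀ (fuel : Nat) (l acc : List Char), l.length ≤ fuel →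
      PySem.Chars.replace.go [a] new fuel l acc =
        acc.reverse ++ l.flatMap (fun c => if c = a then new else [c]) := by
  intro fuel
  induction fuel with
  | zero => intro l acc h; simp at h; subst h; simp [PySem.Chars.replace.go]
  | succ n ih =>
    intro l acc h
    cases l with
    | nil => simp [PySem.Chars.replace.go]
    | cons c t =>
      simp only [PySem.Chars.replace.go]
      by_cases hc : c = a
      · subst hc
        simp only [List.isPrefixOf, beq_self_eq_true, Bool.true_and, if_true]
        rw [ih _ _ (by simpa using Nat.le_of_succ_le_succ h)]
        simp
      · simp only [List.isPrefixOf, Bool.and_true, beq_iff_eq]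
        rw [if_neg (fun h => hc h.symm), ih _ _ (by simpa using Nat.le_of_succ_le_succ h)]
        simp [hc]

theorem pv_replace_single (cs : List Char) (a : Char) (new : List Char) :
    PySem.Chars.replace cs [a] new = cs.flatMap (fun c => if c = a then new else [c]) := by
  rw [PySem.Chars.replace]
  simp [pv_go_single a new cs.length cs [] le_rfl]

theorem pv_flat_sub (a b : Char) (cs : List Char) :
    cs.flatMap (fun c => if c = a then [b] else [c]) = cs.map (fun c => if c = a then b else c) := by
  induction cs with
  | nil => simp
  | cons c t ih => by_cases h : c = a <;> simp [h, ih]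

theorem pv_flat_del (a : Char) (cs : List Char) :
    cs.flatMap (fun c => if c = a then [] else [c]) = cs.filter (fun c => c ≠ a) := by
  induction cs with
  | nil => simp
  | cons c t ih => by_cases h : c = a <;> simp [h, ih]

-- A's formatted part for one (key, value) pair equals B's per-character formatting
theorem pv_part_eq (k v : String) :
    PySem.Str.replace k "_" "-" ++ "-" ++
        PySem.Str.replace (PySem.Str.replace (PySem.Str.replace v "/" "-") " " "_") ";" "" =
      String.ofList (pvNormKeyB k.toList ++ '-' :: pvNormValB v.toList) := by
  apply String.toList_inj.mp
  simp only [String.toList_append, PySem.Str.toList_replace, String.toList_ofList,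
    show ("_":String).toList = ['_'] from by simp, show ("-":String).toList = ['-'] from by simp,
    show ("/":String).toList = ['/'] from by simp, show (" ":String).toList = [' '] from by simp,
    show (";":String).toList = [';'] from by simp, show ("":String).toList = [] from by simp]
  rw [pv_replace_single, pv_replace_single, pv_replace_single, pv_replace_single,
    pv_flat_sub, pv_flat_sub, pv_flat_sub, pv_flat_del]
  simp only [pvNormKeyB, pvNormValB, List.filter_map, List.map_map]
  have hg : ((fun c => if c = ' ' then '_' else c) ∘ fun c => if c = '/' then '-' else c) =
      (fun c => if c = '/' then '-' else if c = ' ' then '_' else c) := by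
    funext c; by_cases h2 : c = '/' <;> by_cases h3 : c = ' ' <;> simp [h2, h3, Function.comp]
  have hp : ((fun c => decide (c ≠ ';')) ∘
      fun c => if c = '/' then '-' else if c = ' ' then '_' else c) = (fun c => decide (c ≠ ';')) := by
    funext c; by_cases h1 : c = ';' <;> by_cases h2 : c = '/' <;> by_cases h3 : c = ' ' <;>
      simp [h1, h2, h3, Function.comp]
  rw [hg, hp, List.append_assoc, List.singleton_append]

-- B's tuple sort key, as one lexicographic key
theorem pv_sorted2_eq_sorted_lex {a : Type} (xs : List a) (k1 : a → Int) (k2 : a → String) :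
    PySem.List.sorted2 xs k1 k2 = PySem.List.sorted xs (fun x => toLex (k1 x, k2 x)) := by
  rw [PySem.List.sorted_eq_foldl_insertBy]
  unfold PySem.List.sorted2
  simp only [Bool.false_eq_true, if_false]
  congr 1
  funext acc x
  congr 1
  funext p q
  rcases lt_trichotomy (k1 p) (k1 q) with h | h | h
  · simp [h, Prod.Lex.lt_iff, h.asymm]
  · simp [h, Prod.Lex.lt_iff]
  · simp [h.asymm, Prod.Lex.lt_iff, h, h.ne']

theorem pv_rank_of_not_mem (k : String) (h : k ∉ pvPrefB) : pvRankB k = 5 := by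
  rw [pvRankB, if_neg (by simpa using h)]
  rfl

-- the single composite-key sort of the items produces A's two-phase key ordering, paired with lookups
theorem pv_ordered_eq (d : PySem.Dict String String) (hnd : d.keys.Nodup) :
    PySem.List.sorted2 d.items (fun p => pvRankB p.1) (fun p => p.1) =
      (pvPrefB.filter (fun k => decide (k ∈ d.keys)) ++
        PySem.List.sorted (d.keys.filter (fun k => !pvPrefB.contains k)) (fun x => x)).map
        (fun k => (k, d.getD k "")) := by
  rw [pv_sorted2_eq_sorted_lex]
  apply PySem.List.sorted_eq_of_perm_of_pairwise_lt
  · -- a permutation of d.items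
    have hkeys : (pvPrefB.filter (fun k => decide (k ∈ d.keys)) ++
        PySem.List.sorted (d.keys.filter (fun k => !pvPrefB.contains k)) (fun x => x)).Perm d.keys := by
      have hp : (pvPrefB.filter (fun k => decide (k ∈ d.keys))).Perm
          (d.keys.filter (fun k => pvPrefB.contains k)) := by
        refine (List.perm_ext_iff_of_nodup (List.Nodup.filter _ (by decide)) (hnd.filter _)).mpr ?_
        intro a
        simp [List.mem_filter, and_comm]
      exact (hp.append (PySem.List.sorted_perm _ _ _)).trans (List.filter_append_perm _ d.keys)
    rw [PySem.Dict.items_eq_map_keys d hnd ""]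
    exact hkeys.map _
  · -- strictly increasing under the lex key
    rw [List.pairwise_map]
    rw [List.pairwise_append]
    refine ⟨?_, ?_, ?_⟩
    · have h : List.Pairwise (fun p q => pvRankB p < pvRankB q) pvPrefB := by decide
      exact (h.filter _).imp (fun hpq => Prod.Lex.lt_iff.mpr (Or.inl hpq))
    · have hle := PySem.List.sorted_pairwise (d.keys.filter (fun k => !pvPrefB.contains k)) (fun x => x)
      have hnd2 : (PySem.List.sorted (d.keys.filter (fun k => !pvPrefB.contains k)) (fun x => x)).Nodup :=
        (PySem.List.sorted_perm _ _ _).symm.nodup (hnd.filter _)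
      refine (hle.and hnd2).imp_of_mem ?_
      intro p q hp hq hpq
      rw [PySem.List.mem_sorted, List.mem_filter] at hp hq
      have hp5 : pvRankB p = 5 := pv_rank_of_not_mem p (by simpa using hp.2)
      have hq5 : pvRankB q = 5 := pv_rank_of_not_mem q (by simpa using hq.2)
      refine Prod.Lex.lt_iff.mpr (Or.inr ⟨by simp [hp5, hq5], ?_⟩)
      exact lt_of_le_of_ne hpq.1 hpq.2
    · intro p hp q hq
      have hpm : p ∈ pvPrefB := (List.mem_filter.mp hp).1
      have hq5 : pvRankB q = 5 := by
        rw [PySem.List.mem_sorted, List.mem_filter] at hq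
        exact pv_rank_of_not_mem q (by simpa using hq.2)
      have hp5 : pvRankB p < 5 := by
        have : ∀ x ∈ pvPrefB, pvRankB x < 5 := by decide
        exact this p hpm
      exact Prod.Lex.lt_iff.mpr (Or.inl (by rw [hq5]; exact hp5))

-- ===== VERDICT (by name: the statement is the Claim_ definition above) =====
theorem build_branch_key_spec : Claim_equal_build_branch_key := by
  intro params _
  show build_branch_key params = build_branch_key_alt params
  unfold build_branch_key build_branch_key_alt
  simp only [PySem.List.foldl_append_singleton_eq_map, List.nil_append,
    PySem.Dict.contains_eq_decide_mem_keys]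
  rw [pv_ordered_eq (PySem.Dict.ofList params) (PySem.Dict.nodup_keys_ofList params), List.map_map]
  exact congrArg (PySem.Str.join "__") (List.map_congr_left (fun k _ => pv_part_eq k _))
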